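-- pv_equiv track=rewrite | github.com/zentrum-lexikographie/wordprofile | preprocessing/annotate_deprel.py | group_sentences_to_documents
-- ===== SOURCE A (Python) =====
-- def group_sentences_to_documents(sentences):
--     doc = []
--     for sent in sentences:
--         if "# DDC:meta.file_ =" in sent:
--             if len(doc):
--                 yield "\n".join(doc)
--             doc = [sent]
--         else:
--             doc.append(sent)
--     if len(doc):
--         yield "\n".join(doc)
-- ===== SOURCE B (Python) =====
-- MARKER = "# DDC:meta.file_ ="
--
--
-- def group_sentences_to_documents(sentences):
--     # Split into marker-delimited chunks: each document starts at position 0 or at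
--     # a marker sentence and extends over the following run of non-marker sentences.
--     xs = list(sentences)
--     n = len(xs)
--     i = 0
--     while i < n:
--         j = i + 1
--         while j < n and MARKER not in xs[j]:
--             j += 1
--         yield "\n".join(xs[i:j])
--         i = j
-- ===== Notes on version B (the rewrite author's own statement) =====
-- stated objective: alternative
-- what changed: Replaces A's streaming accumulate-and-flush loop with a recursive decomposition: split off the leading run of non-marker sentences after each document head and join each chunk, recursing on the remainder.
import Mathlib
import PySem

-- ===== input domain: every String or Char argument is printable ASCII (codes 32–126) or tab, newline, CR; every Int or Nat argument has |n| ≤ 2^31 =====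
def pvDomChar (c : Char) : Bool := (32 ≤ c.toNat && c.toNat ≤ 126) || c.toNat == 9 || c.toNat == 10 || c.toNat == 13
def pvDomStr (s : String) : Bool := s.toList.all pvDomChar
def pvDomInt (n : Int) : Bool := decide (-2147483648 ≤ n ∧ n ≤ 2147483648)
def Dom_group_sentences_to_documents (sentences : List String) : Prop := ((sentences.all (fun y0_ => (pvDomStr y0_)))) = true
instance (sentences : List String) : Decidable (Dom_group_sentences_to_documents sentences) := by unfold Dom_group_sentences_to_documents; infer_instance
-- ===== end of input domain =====

-- ===== PORT A =====
-- B replaces A's streaming accumulate-and-flush loop with a recursive split into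
-- marker-delimited chunks (different decomposition, same cost). A is a generator;
-- the equivalence is about the yielded sequence of values.
def pvMarker : String := "# DDC:meta.file_ ="

def pvStepA (st : List String × List String) (sent : String) : List String × List String :=
  if PySem.Str.isIn pvMarker sent then
    (if st.2.length ≠ 0 then st.1 ++ [PySem.Str.join "\n" st.2] else st.1, [sent])
  else
    (st.1, st.2 ++ [sent])

def group_sentences_to_documents (sentences : List String) : List String :=
  let st := sentences.foldl pvStepA ([], [])
  if st.2.length ≠ 0 then st.1 ++ [PySem.Str.join "\n" st.2] else st.1

-- ===== PORT B =====
-- Source B's inner 'while j < n and MARKER not in xs[j]' scan, rendered as structural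
-- recursion over the list suffix: the leading run of non-marker sentences (= xs[i+1:j])
-- together with the remainder (= xs[j:]).
def pvSplitBody : List String → List String × List String
  | [] => ([], [])
  | s :: rest =>
    if ¬ PySem.Str.isIn pvMarker s then
      let (body, tail) := pvSplitBody rest
      (s :: body, tail)
    else ([], s :: rest)

theorem pvSplitBody_tail_le (l : List String) : (pvSplitBody l).2.length ≤ l.length := by
  induction l with
  | nil => simp [pvSplitBody]
  | cons s rest ih =>
    simp only [pvSplitBody]
    split
    · simpa using Nat.le_succ_of_le ih
    · simp

-- Source B's outer while loop: each iteration emits "\n".join(xs[i:j]) (head plus its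
-- non-marker run) and continues at i = j — one chunk per recursive step.
def pvDocs : List String → List String
  | [] => []
  | s :: rest =>
    PySem.Str.join "\n" (s :: (pvSplitBody rest).1) :: pvDocs (pvSplitBody rest).2
termination_by l => l.length
decreasing_by
  simpa using Nat.lt_succ_of_le (pvSplitBody_tail_le rest)

def group_sentences_to_documents_alt (sentences : List String) : List String :=
  pvDocs sentences

-- ===== PRECONDITION & SPEC =====
def Spec_group_sentences_to_documents (sentences : List String) (out : List String) : Prop := out = group_sentences_to_documents_alt sentences
instance (sentences : List String) (out : List String) : Decidable (Spec_group_sentences_to_documents sentences out) := by unfold Spec_group_sentences_to_documents; infer_instance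

-- ===== CLAIM (what is proved, stated in full; the proofs are below) =====
def Claim_equal_group_sentences_to_documents : Prop := ∀ (sentences : List String), Dom_group_sentences_to_documents sentences → Spec_group_sentences_to_documents sentences (group_sentences_to_documents sentences)

-- ===== LEMMAS AND PROOFS =====

def pvFinish (st : List String × List String) : List String :=
  if st.2.length ≠ 0 then st.1 ++ [PySem.Str.join "\n" st.2] else st.1

theorem pvLoopA_eq (xs : List String) : ∀ (out doc : List String), doc ≠ [] →
    pvFinish (xs.foldl pvStepA (out, doc)) =
      out ++ PySem.Str.join "\n" (doc ++ (pvSplitBody xs).1) :: pvDocs (pvSplitBody xs).2 := by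
  induction xs with
  | nil =>
    intro out doc hdoc
    simp [pvFinish, pvSplitBody, pvDocs, List.length_eq_zero_iff, hdoc]
  | cons s rest ih =>
    intro out doc hdoc
    by_cases hm : PySem.Chars.isIn pvMarker.toList s.toList = true
    · have hstep : pvStepA (out, doc) s = (out ++ [PySem.Str.join "\n" doc], [s]) := by
        simp [pvStepA, hm, List.length_eq_zero_iff, hdoc]
      rw [List.foldl_cons, hstep, ih _ _ (by simp)]
      simp [pvSplitBody, hm, pvDocs]
    · have hstep : pvStepA (out, doc) s = (out, doc ++ [s]) := by
        simp [pvStepA, hm]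
      rw [List.foldl_cons, hstep, ih _ _ (by simp)]
      simp [pvSplitBody, hm]

-- ===== VERDICT (by name: the statement is the Claim_ definition above) =====
theorem group_sentences_to_documents_spec : Claim_equal_group_sentences_to_documents := by
  intro sentences _
  show group_sentences_to_documents sentences = group_sentences_to_documents_alt sentences
  cases sentences with
  | nil => simp [group_sentences_to_documents, group_sentences_to_documents_alt, pvDocs, pvFinish]
  | cons s rest =>
    have hstep : pvStepA ([], []) s = ([], [s]) := by
      by_cases hm : PySem.Chars.isIn pvMarker.toList s.toList = true <;> simp [pvStepA, hm]
    show pvFinish (List.foldl pvStepA ([], []) (s :: rest)) = _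
    rw [List.foldl_cons, hstep, pvLoopA_eq rest [] [s] (by simp)]
    simp [group_sentences_to_documents_alt, pvDocs]
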